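-- pv_equiv track=rewrite | github.com/alexandro-tadeu/magreHeroku | appSeqPdb.py | extrair_sequencias_fasta_multicadeia
-- ===== SOURCE A (Python) =====
-- def extrair_sequencias_fasta_multicadeia(fasta_lines):
--     sequencias = {}
--     cadeia_atual = None
--     for line in fasta_lines:
--         if line.startswith(">"):
--             parts = line.split("|")
--             header = parts[0]
--             if "_" in header:
--                 cadeia = header.split("_")[1].strip()
--             else:
--                 cadeia = "N/A"
--             cadeia_atual = cadeia
--             sequencias[cadeia_atual] = ""
--         else:
--             if cadeia_atual is not None:
--                 sequencias[cadeia_atual] += line.strip()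
--     return sequencias
-- ===== SOURCE B (Python) =====
-- def extrair_sequencias_fasta_multicadeia(fasta_lines):
--     # Two-phase decomposition: first split the input into (header, body-lines) blocks
--     # (lines before the first header are discarded), then build the dict block by block.
--     blocks = []
--     i, n = 0, len(fasta_lines)
--     while i < n and not fasta_lines[i].startswith(">"):
--         i += 1
--     while i < n:
--         j = i + 1
--         while j < n and not fasta_lines[j].startswith(">"):
--             j += 1
--         blocks.append((fasta_lines[i], fasta_lines[i + 1:j]))
--         i = j
--     sequencias = {}
--     for header_line, body in blocks:
--         header = header_line.split("|")[0]
--         chave = header.split("_")[1].strip() if "_" in header else "N/A"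
--         sequencias[chave] = "".join(line.strip() for line in body)
--     return sequencias
-- ===== Notes on version B (the rewrite author's own statement) =====
-- stated objective: alternative
-- what changed: B replaces A's single stateful pass (current-chain variable, incremental string appends into the dict) with a two-phase segment-then-reduce: it first splits the input into (header, body) blocks, then assigns each block's key its joined stripped body in one dict write per block.
import Mathlib
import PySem

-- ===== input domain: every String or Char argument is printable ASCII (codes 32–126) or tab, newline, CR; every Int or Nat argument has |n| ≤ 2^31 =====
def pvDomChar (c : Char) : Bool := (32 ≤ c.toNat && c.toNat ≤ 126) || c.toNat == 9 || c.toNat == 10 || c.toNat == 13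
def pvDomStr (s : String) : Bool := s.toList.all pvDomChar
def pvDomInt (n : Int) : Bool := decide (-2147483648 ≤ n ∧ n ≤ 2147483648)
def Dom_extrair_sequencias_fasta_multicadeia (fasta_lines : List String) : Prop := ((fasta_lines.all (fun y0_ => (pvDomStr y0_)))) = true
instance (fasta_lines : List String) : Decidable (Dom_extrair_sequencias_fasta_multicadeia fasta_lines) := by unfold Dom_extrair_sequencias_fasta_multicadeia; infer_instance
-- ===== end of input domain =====

-- B restructures A's single stateful pass as a segment-then-reduce: split into (header, body) blocks, then one dict write per block; equivalence of the return values is proved below.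


-- ===== PORT A =====
-- header key extraction: parts = line.split("|"); header = parts[0];
-- cadeia = header.split("_")[1].strip() if "_" in header else "N/A"
-- (split never returns an empty list, so parts[0] = headD ""; when "_" ∈ header the
--  split has ≥ 2 pieces, so [1] = getD 1 "" — both are exact here, no IndexError possible)
def pvAKey (line : String) : String :=
  let header := ((PySem.Str.split? line "|").getD []).headD ""
  if PySem.Str.isIn "_" header then
    PySem.Str.strip ((((PySem.Str.split? header "_").getD []).getD 1 ""))
  else "N/A"

-- A's loop, state = (sequencias, cadeia_atual); 'sequencias[cadeia_atual] += line.strip()'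
-- is insert k (old ++ strip line): the key is always present (set to "" at its header),
-- so getD reads the same value Python's d[k] reads.
def pvALoop : List String → PySem.Dict String String → Option String → PySem.Dict String String
  | [], d, _ => d
  | l :: ls, d, c =>
    if PySem.Str.startswith l ">" then
      let k := pvAKey l
      pvALoop ls (d.insert k "") (some k)
    else
      match c with
      | none => pvALoop ls d none
      | some k => pvALoop ls (d.insert k (d.getD k "" ++ PySem.Str.strip l)) (some k)

def extrair_sequencias_fasta_multicadeia (fasta_lines : List String) : List (String × String) :=
  (pvALoop fasta_lines PySem.Dict.empty none).items

-- ===== PORT B =====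
-- B phase 1: cut the input into blocks (header line, following non-header lines);
-- lines before the first header are dropped.
def pvBlocks : List String → List (String × List String)
  | [] => []
  | l :: ls =>
    if PySem.Str.startswith l ">" then
      (l, ls.takeWhile (fun x => !PySem.Str.startswith x ">")) ::
        pvBlocks (ls.dropWhile (fun x => !PySem.Str.startswith x ">"))
    else pvBlocks ls
termination_by ls => ls.length
decreasing_by
  · exact Nat.lt_succ_of_le (List.length_dropWhile_le _ _)
  · exact Nat.lt_succ_of_le (Nat.le_refl _)

-- B's key extraction (same parsing expression as in Source B)
def pvBKey (header_line : String) : String :=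
  let header := ((PySem.Str.split? header_line "|").getD []).headD ""
  if PySem.Str.isIn "_" header then
    PySem.Str.strip ((((PySem.Str.split? header "_").getD []).getD 1 ""))
  else "N/A"

-- B phase 2: one dict write per block, value = "".join(line.strip() for line in body)
def extrair_sequencias_fasta_multicadeia_alt (fasta_lines : List String) : List (String × String) :=
  ((pvBlocks fasta_lines).foldl
    (fun d b => d.insert (pvBKey b.1) (PySem.Str.join "" (b.2.map PySem.Str.strip)))
    PySem.Dict.empty).items

-- ===== PRECONDITION & SPEC =====
def Spec_extrair_sequencias_fasta_multicadeia (fasta_lines : List String) (out : List (String × String)) : Prop := out = extrair_sequencias_fasta_multicadeia_alt fasta_lines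
instance (fasta_lines : List String) (out : List (String × String)) : Decidable (Spec_extrair_sequencias_fasta_multicadeia fasta_lines out) := by unfold Spec_extrair_sequencias_fasta_multicadeia; infer_instance

-- ===== CLAIM (what is proved, stated in full; the proofs are below) =====
def Claim_equal_extrair_sequencias_fasta_multicadeia : Prop := ∀ (fasta_lines : List String), Dom_extrair_sequencias_fasta_multicadeia fasta_lines → Spec_extrair_sequencias_fasta_multicadeia fasta_lines (extrair_sequencias_fasta_multicadeia fasta_lines)

-- ===== LEMMAS AND PROOFS =====

theorem pvBKey_eq_pvAKey (l : String) : pvBKey l = pvAKey l := rfl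

theorem pv_join_empty_cons (a : String) (l : List String) :
    PySem.Str.join "" (a :: l) = a ++ PySem.Str.join "" l := by
  cases l with
  | nil => simp [PySem.Str.join, PySem.Chars.join_singleton]
  | cons b t => simp [PySem.Str.join, PySem.Chars.join_cons_cons]

theorem pv_join_empty_nil : PySem.Str.join "" ([] : List String) = "" := rfl

-- running A's loop over a header-free body appends the stripped, joined body to key k
theorem pvALoop_body (body : List String) (h : ∀ x ∈ body, PySem.Str.startswith x ">" = false) :
    ∀ (rest : List String) (d : PySem.Dict String String) (k v : String),
      pvALoop (body ++ rest) (d.insert k v) (some k) =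
      pvALoop rest (d.insert k (v ++ PySem.Str.join "" (body.map PySem.Str.strip))) (some k) := by
  induction body with
  | nil => intro rest d k v; simp [pv_join_empty_nil, String.append_empty]
  | cons b bs ih =>
    intro rest d k v
    have hb : PySem.Str.startswith b ">" = false := h b (by simp)
    have hbs : ∀ x ∈ bs, PySem.Str.startswith x ">" = false := fun x hx => h x (by simp [hx])
    simp only [List.cons_append, pvALoop, hb, Bool.false_eq_true, if_false,
      PySem.Dict.getD_insert_self, PySem.Dict.insert_insert_self]
    rw [ih hbs rest d k (v ++ PySem.Str.strip b), List.map_cons, pv_join_empty_cons,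
      String.append_assoc]

theorem pv_dropWhile_head (p : α → Bool) (l : List α) :
    l.dropWhile p = [] ∨ ∃ h t, l.dropWhile p = h :: t ∧ p h = false := by
  induction l with
  | nil => left; rfl
  | cons a l ih =>
    by_cases ha : p a
    · simpa [List.dropWhile_cons, ha] using ih
    · right; exact ⟨a, l, by simp [ha], by simpa using ha⟩

-- when the remaining input is empty or starts with a header, the carried chain state is irrelevant
theorem pvALoop_state_irrel (rest : List String)
    (h : rest = [] ∨ ∃ x t, rest = x :: t ∧ PySem.Str.startswith x ">" = true)
    (d : PySem.Dict String String) (c : Option String) :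
    pvALoop rest d c = pvALoop rest d none := by
  rcases h with h | ⟨x, t, rfl, hx⟩
  · subst h; rfl
  · have hx' : PySem.Chars.startswith x.toList ['>'] = true := by simpa using hx
    simp [pvALoop, hx']

theorem pvALoop_eq_blocks : ∀ (n : Nat) (lines : List String), lines.length ≤ n →
    ∀ d : PySem.Dict String String,
      pvALoop lines d none =
      (pvBlocks lines).foldl
        (fun d b => d.insert (pvBKey b.1) (PySem.Str.join "" (b.2.map PySem.Str.strip))) d := by
  intro n
  induction n with
  | zero =>
    intro lines hlen d
    have : lines = [] := List.eq_nil_of_length_eq_zero (Nat.le_zero.mp hlen)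
    subst this; simp [pvALoop, pvBlocks]
  | succ n ih =>
    intro lines hlen d
    cases lines with
    | nil => simp [pvALoop, pvBlocks]
    | cons l ls =>
      by_cases hl : PySem.Str.startswith l ">"
      · have hl' : PySem.Chars.startswith l.toList ['>'] = true := by simpa using hl
        set body := ls.takeWhile (fun x => !PySem.Str.startswith x ">") with hbody
        set rest := ls.dropWhile (fun x => !PySem.Str.startswith x ">") with hrest
        have hsplit : body ++ rest = ls := List.takeWhile_append_dropWhile
        have hbodyh : ∀ x ∈ body, PySem.Str.startswith x ">" = false := by
          intro x hx
          have := List.mem_takeWhile_imp hx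
          simpa using this
        have hstep : pvALoop (l :: ls) d none =
            pvALoop rest (d.insert (pvAKey l) (PySem.Str.join "" (body.map PySem.Str.strip))) (some (pvAKey l)) := by
          simp only [pvALoop]
          rw [if_pos hl]
          rw [← hsplit, pvALoop_body body hbodyh rest d (pvAKey l) "",
            String.empty_append]
        have hresth : rest = [] ∨ ∃ x t, rest = x :: t ∧ PySem.Str.startswith x ">" = true := by
          rcases pv_dropWhile_head (fun x => !PySem.Str.startswith x ">") ls with h | ⟨x, t, hx, hpx⟩
          · left; rw [hrest]; exact h
          · right; exact ⟨x, t, by rw [hrest]; exact hx, by simpa using hpx⟩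
        have hrlen : rest.length ≤ n := by
          have h1 : rest.length ≤ ls.length := List.length_dropWhile_le _ _
          have h2 : ls.length ≤ n := by simpa using Nat.lt_succ_iff.mp (Nat.lt_of_lt_of_le (by simp) hlen)
          omega
        rw [hstep, pvALoop_state_irrel rest hresth, ih rest hrlen]
        have hblk : pvBlocks (l :: ls) = (l, body) :: pvBlocks rest := by
          rw [pvBlocks]; simp [hl', hbody, hrest]
        rw [hblk, List.foldl_cons, pvBKey_eq_pvAKey]
      · have hl' : PySem.Chars.startswith l.toList ['>'] = false := by
          simpa using hl
        have hstep : pvALoop (l :: ls) d none = pvALoop ls d none := by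
          simp [pvALoop, hl']
        have hblk : pvBlocks (l :: ls) = pvBlocks ls := by
          rw [pvBlocks]; simp [hl']
        have hlslen : ls.length ≤ n := by simpa using Nat.lt_succ_iff.mp (Nat.lt_of_lt_of_le (by simp) hlen)
        rw [hstep, hblk, ih ls hlslen]

-- ===== VERDICT (by name: the statement is the Claim_ definition above) =====
theorem extrair_sequencias_fasta_multicadeia_spec : Claim_equal_extrair_sequencias_fasta_multicadeia := by
  intro fasta_lines _
  show (pvALoop fasta_lines PySem.Dict.empty none).items = _
  unfold extrair_sequencias_fasta_multicadeia_alt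
  rw [pvALoop_eq_blocks fasta_lines.length fasta_lines (Nat.le_refl _)]
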